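-- pv_equiv track=rewrite | github.com/jurijw/notpron | lvl16.py | invertString
-- ===== SOURCE A (Python) =====
-- alphabet = "abcdefghijklmnopqrstuvwxyz"
--
-- def invert(c):
--     """Given a letter C in the alphabet, return the letter at the same index, given that the alphabet has been inverted."""
--     index = alphabet.find(c)
--     return alphabet[::-1][index]
--
-- def invertString(string):
--     output = ""
--     for char in string:
--         if char not in alphabet:
--             output += char
--         else:
--             output += invert(char)
--     return output
-- ===== SOURCE B (Python) =====
-- def invertString(string):
--     return "".join(
--         chr(ord("a") + ord("z") - ord(c)) if "a" <= c <= "z" else c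
--         for c in string
--     )
-- ===== Notes on version B (the rewrite author's own statement) =====
-- stated objective: simpler
-- what changed: Replaces the per-character alphabet-string find plus reversed-string table lookup with a direct closed-form arithmetic mirror of the character code guarded by a lowercase range test, built via a join of a generator instead of repeated string concatenation.
import Mathlib
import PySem

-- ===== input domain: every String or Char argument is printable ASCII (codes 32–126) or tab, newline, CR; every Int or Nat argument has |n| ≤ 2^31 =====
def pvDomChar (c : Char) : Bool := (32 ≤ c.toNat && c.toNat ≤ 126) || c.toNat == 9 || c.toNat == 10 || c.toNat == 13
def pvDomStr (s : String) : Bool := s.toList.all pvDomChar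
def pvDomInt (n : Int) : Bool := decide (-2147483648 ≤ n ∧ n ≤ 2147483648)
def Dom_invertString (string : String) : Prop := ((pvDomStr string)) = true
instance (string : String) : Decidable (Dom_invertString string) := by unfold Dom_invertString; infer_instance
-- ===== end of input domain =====

-- B replaces A's alphabet.find + reversed-alphabet table lookup with the closed-form
-- arithmetic mirror chr(ord('a')+ord('z')-ord(c)); objective: simpler.

-- ===== PORT A =====
def pvAlphabet : List Char := "abcdefghijklmnopqrstuvwxyz".toList

-- invert(c): index = alphabet.find(c); return alphabet[::-1][index].
-- pyGet? models the indexing (none = IndexError); invert is only called on c ∈ alphabet,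
-- where pyGet? is always some, so the caller appends Option.toList (the [] case is unreachable).
def pvInvert (c : Char) : Option Char :=
  let index := PySem.Chars.find pvAlphabet [c]
  PySem.List.pyGet? ((PySem.List.slice? pvAlphabet none none (-1)).getD []) index

def invertString (string : String) : String :=
  String.ofList <|
    string.toList.foldl (fun output char =>
      if ¬ PySem.Chars.isIn [char] pvAlphabet then output ++ [char]
      else output ++ (pvInvert char).toList) []

-- ===== PORT B =====
def invertString_alt (string : String) : String :=
  String.ofList <|
    string.toList.map (fun c =>
      if 'a' ≤ c ∧ c ≤ 'z' then Char.ofNat (97 + 122 - c.toNat) else c)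

-- ===== PRECONDITION & SPEC =====
def Spec_invertString (string : String) (out : String) : Prop := out = invertString_alt string
instance (string : String) (out : String) : Decidable (Spec_invertString string out) := by unfold Spec_invertString; infer_instance

-- ===== CLAIM (what is proved, stated in full; the proofs are below) =====
def Claim_equal_invertString : Prop := ∀ (string : String), Dom_invertString string → Spec_invertString string (invertString string)

-- ===== LEMMAS AND PROOFS =====

lemma pvAlphabet_lit : pvAlphabet =
    ['a','b','c','d','e','f','g','h','i','j','k','l','m',
     'n','o','p','q','r','s','t','u','v','w','x','y','z'] := by decide

lemma mem_pvAlphabet_of_range {c : Char} (h1 : 'a' ≤ c) (h2 : c ≤ 'z') : c ∈ pvAlphabet := by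
  have key : ∀ n, 97 ≤ n → n ≤ 122 → Char.ofNat n ∈ pvAlphabet := by
    intro n hn1 hn2; interval_cases n <;> decide
  have := key c.toNat h1 h2
  rwa [Char.ofNat_toNat] at this

lemma step_eq (c : Char) :
    (if ¬ PySem.Chars.isIn [c] pvAlphabet then ([c] : List Char) else (pvInvert c).toList)
    = [if 'a' ≤ c ∧ c ≤ 'z' then Char.ofNat (97 + 122 - c.toNat) else c] := by
  by_cases hmem : c ∈ pvAlphabet
  · rw [pvAlphabet_lit] at hmem
    simp only [List.mem_cons, List.not_mem_nil, or_false] at hmem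
    rcases hmem with h|h|h|h|h|h|h|h|h|h|h|h|h|h|h|h|h|h|h|h|h|h|h|h|h|h <;>
      subst h <;> decide
  · have hr : ¬('a' ≤ c ∧ c ≤ 'z') := fun ⟨h1, h2⟩ => hmem (mem_pvAlphabet_of_range h1 h2)
    have hin : PySem.Chars.isIn [c] pvAlphabet = false := by
      rw [PySem.Chars.isIn_eq_false_iff]
      intro hinf
      exact hmem (hinf.subset (by simp))
    simp [hin, hr]

lemma foldl_step (l : List Char) (acc : List Char) :
    l.foldl (fun output char =>
      if ¬ PySem.Chars.isIn [char] pvAlphabet then output ++ [char]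
      else output ++ (pvInvert char).toList) acc
    = acc ++ l.map (fun c =>
        if 'a' ≤ c ∧ c ≤ 'z' then Char.ofNat (97 + 122 - c.toNat) else c) := by
  induction l generalizing acc with
  | nil => simp
  | cons x xs ih =>
    rw [List.foldl_cons, List.map_cons, ih,
        (apply_ite (fun t => acc ++ t) (¬ PySem.Chars.isIn [x] pvAlphabet = true)
          [x] (pvInvert x).toList).symm, step_eq x]
    simp

-- ===== VERDICT (by name: the statement is the Claim_ definition above) =====
theorem invertString_spec : Claim_equal_invertString := by
  intro s _
  unfold Spec_invertString invertString invertString_alt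
  rw [foldl_step]
  simp
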